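-- pv_equiv track=rewrite | github.com/jjpp/aoc | 2016/07/ssl.py | check
-- ===== SOURCE A (Python) =====
-- def aba(s):
--     out = []
--     for i in range(2, len(s)):
--         if s[i - 2] == s[i] and s[i-1] != s[i]:
--             out += [s[i-2:i+1]]
--     return out
--
-- def check(l):
--     abas = []
--     babs = []
--     while len(l) > 0:
--         _l = l.split('[', 1)
--         abas += aba(_l[0])
--         l = _l[1] if len(_l) > 1 else ""
--
--         _l = l.split(']', 1)
--         babs += aba(_l[0])
--         l = _l[1] if len(_l) > 1 else ""
--
--     for a in abas:
--         if a[1] + a[0] + a[1] in babs: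
--             return 1
--
--     return 0
-- ===== SOURCE B (Python) =====
-- # Single left-to-right scan with an inside-brackets flag and a 2-char window
-- # (reset at each delimiter), instead of repeatedly splitting the string.
-- def check(l):
--     sup = []
--     hyp = []
--     inside = False
--     c2 = c1 = None
--     for c in l:
--         if c == (']' if inside else '['):
--             inside = not inside
--             c2 = c1 = None
--         else:
--             if c2 is not None and c2 == c and c1 != c:
--                 (hyp if inside else sup).append(c2 + c1 + c)
--             c2, c1 = c1, c
--     return 1 if any(a[1] + a[0] + a[1] in hyp for a in sup) else 0
-- ===== Notes on version B (the rewrite author's own statement) =====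
-- stated objective: alternative
-- what changed: Replaces A's repeated one-bracket split peeling plus a separate index-based aba() helper with a single left-to-right scan that keeps an inside-brackets flag and a two-character window reset at each delimiter, collecting supernet/hypernet ABAs in one pass.
import Mathlib
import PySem

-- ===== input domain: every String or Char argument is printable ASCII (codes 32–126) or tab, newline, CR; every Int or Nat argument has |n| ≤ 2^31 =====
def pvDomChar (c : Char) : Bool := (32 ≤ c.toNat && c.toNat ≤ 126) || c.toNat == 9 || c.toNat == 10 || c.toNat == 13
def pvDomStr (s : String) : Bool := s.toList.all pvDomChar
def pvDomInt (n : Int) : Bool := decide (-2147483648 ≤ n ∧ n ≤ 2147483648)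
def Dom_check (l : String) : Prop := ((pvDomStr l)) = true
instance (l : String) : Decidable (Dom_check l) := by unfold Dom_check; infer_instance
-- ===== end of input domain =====

-- B replaces A's repeated one-delimiter split peeling with one left-to-right scan
-- keeping an inside-brackets flag and a reset-on-delimiter two-char window
-- (objective: alternative decomposition, same asymptotic cost).

-- `splitOnce c l`: the part of `l` before the first `c`, and (if `c` occurs)
-- the part after it.  Used to state the termination lemmas the ports cite.
def splitOnce (c : Char) : List Char → List Char × Option (List Char)
  | [] => ([], none)
  | x :: xs =>
    if x = c then ([], some xs)
    else
      let r := splitOnce c xs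
      (x :: r.1, r.2)

theorem splitOnMax_go_m0 (c : Char) (f : Nat) (l cur : List Char) (acc : List (List Char)) :
    PySem.Chars.splitOnMax.go [c] f 0 l cur acc = ((cur.reverse ++ l) :: acc).reverse := by
  cases f with
  | zero => simp [PySem.Chars.splitOnMax.go]
  | succ f => cases l <;> simp [PySem.Chars.splitOnMax.go]

theorem splitOnMax_go_one (c : Char) : ∀ (f : Nat) (l cur : List Char) (acc : List (List Char)),
    l.length < f →
    PySem.Chars.splitOnMax.go [c] f 1 l cur acc =
      (match splitOnce c l with
       | (p, none) => ((cur.reverse ++ p) :: acc).reverse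
       | (p, some r) => (r :: (cur.reverse ++ p) :: acc).reverse) := by
  intro f
  induction f with
  | zero => intro l cur acc h; omega
  | succ f ih =>
    intro l cur acc h
    cases l with
    | nil => simp [PySem.Chars.splitOnMax.go, splitOnce]
    | cons x xs =>
      by_cases hx : x = c
      · subst hx
        simp only [PySem.Chars.splitOnMax.go, splitOnce, List.isPrefixOf]
        simp [splitOnMax_go_m0]
      · have hbc : (c == x) = false := by
          simp; exact fun h' => hx h'.symm
        simp only [PySem.Chars.splitOnMax.go, splitOnce, List.isPrefixOf]
        rw [ih xs (x :: cur) acc (by simpa using Nat.lt_of_succ_lt_succ h)]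
        cases hsp : splitOnce c xs with
        | mk p r =>
          cases r <;> simp [hsp, hbc, hx]

theorem splitOnMax_one (c : Char) (l : List Char) :
    PySem.Chars.splitOnMax l [c] 1 =
      (match splitOnce c l with
       | (p, none) => [p]
       | (p, some r) => [p, r]) := by
  unfold PySem.Chars.splitOnMax
  rw [if_neg (by omega)]
  rw [show Int.toNat 1 = 1 from rfl]
  rw [splitOnMax_go_one c (l.length + 1) l [] [] (by omega)]
  cases hsp : splitOnce c l with
  | mk p r => cases r <;> simp

theorem splitOnce_len (c : Char) : ∀ (l p r : List Char), splitOnce c l = (p, some r) →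
    p.length + 1 + r.length = l.length := by
  intro l
  induction l with
  | nil => intro p r h; simp [splitOnce] at h
  | cons x xs ih =>
    intro p r h
    by_cases hx : x = c
    · rw [splitOnce, if_pos hx] at h
      simp at h
      obtain ⟨h1, h2⟩ := h
      subst h1; subst h2; simp; omega
    · rw [splitOnce, if_neg hx] at h
      cases hsp : splitOnce c xs with
      | mk p' r' =>
        rw [hsp] at h
        cases r' with
        | none => simp at h
        | some r'' =>
          simp at h
          obtain ⟨h1, h2⟩ := h
          have hx2 := ih p' r'' hsp
          have e1 : p.length = p'.length + 1 := by rw [← h1]; simp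
          have e2 : r.length = r''.length := by rw [← h2]
          simp only [List.length_cons]
          omega

-- ===== PORT A =====
-- `aba(s)`: fold over range(2, len(s)) collecting s[i-2:i+1] on each ABA hit.
def abaA (s : List Char) : List (List Char) :=
  (PySem.List.pyRange 2 (PySem.List.len s) 1).foldl
    (fun out i =>
      if PySem.List.pyGetD s (i - 2) ' ' = PySem.List.pyGetD s i ' ' ∧
         PySem.List.pyGetD s (i - 1) ' ' ≠ PySem.List.pyGetD s i ' '
      then out ++ [PySem.List.slice s (some (i - 2)) (some (i + 1))]
      else out) []

-- `_l[1] if len(_l) > 1 else ""`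
def pickA (p : List (List Char)) : List Char :=
  if 1 < PySem.List.len p then PySem.List.pyGetD p 1 [] else []

theorem pickA_len_lt (c : Char) (l : List Char) (h : l ≠ []) :
    (pickA (PySem.Chars.splitOnMax l [c] 1)).length < l.length := by
  rw [splitOnMax_one]
  cases hsp : splitOnce c l with
  | mk p r =>
    cases r with
    | none =>
      simp [pickA, PySem.List.len_eq]
      cases l with
      | nil => exact absurd rfl h
      | cons a as => simp
    | some rest =>
      have hlen := splitOnce_len c l p rest hsp
      simp [pickA, PySem.List.len_eq]
      have : PySem.List.pyGetD [p, rest] 1 [] = rest := by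
        simpa using PySem.List.pyGetD_natCast [p, rest] 1 []
      rw [this]; omega

theorem pickA_len_le (c : Char) (l : List Char) :
    (pickA (PySem.Chars.splitOnMax l [c] 1)).length ≤ l.length := by
  cases l with
  | nil =>
    rw [splitOnMax_one]
    simp [splitOnce, pickA, PySem.List.len_eq]
  | cons x xs => exact Nat.le_of_lt (pickA_len_lt c (x :: xs) (by simp))

-- `a[1] + a[0] + a[1]`
def babA (a : List Char) : List Char :=
  [PySem.List.pyGetD a 1 ' ', PySem.List.pyGetD a 0 ' ', PySem.List.pyGetD a 1 ' ']

-- the final `for a in abas: if ... in babs: return 1` / `return 0`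
def finalA (abas babs : List (List Char)) : Int :=
  match abas with
  | [] => 0
  | a :: rest => if babA a ∈ babs then 1 else finalA rest babs

-- the `while len(l) > 0` loop
def checkGo (l : List Char) (abas babs : List (List Char)) : Int :=
  if h : 0 < l.length then
    let l1 := PySem.Chars.splitOnMax l ['['] 1
    let abas1 := abas ++ abaA (PySem.List.pyGetD l1 0 [])
    let r1 := pickA l1
    let l2 := PySem.Chars.splitOnMax r1 [']'] 1
    let babs1 := babs ++ abaA (PySem.List.pyGetD l2 0 [])
    let r2 := pickA l2
    checkGo r2 abas1 babs1
  else finalA abas babs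
termination_by l.length
decreasing_by
  exact Nat.lt_of_le_of_lt (pickA_len_le ']' (pickA (PySem.Chars.splitOnMax l ['['] 1)))
    (pickA_len_lt '[' l (by intro hnil; rw [hnil] at h; simp at h))

def check (l : String) : Int := checkGo l.toList [] []

-- ===== PORT B =====
structure BSt where
  inside : Bool
  c2 : Option Char
  c1 : Option Char
  sup : List (List Char)
  hyp : List (List Char)

def stepB (st : BSt) (c : Char) : BSt :=
  if c = (if st.inside then ']' else '[') then
    { inside := !st.inside, c2 := none, c1 := none, sup := st.sup, hyp := st.hyp }
  else
    let add : List (List Char) :=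
      match st.c2, st.c1 with
      | some a, some b => if a = c ∧ b ≠ c then [[a, b, c]] else []
      | _, _ => []
    { inside := st.inside, c2 := st.c1, c1 := some c,
      sup := if st.inside then st.sup else st.sup ++ add,
      hyp := if st.inside then st.hyp ++ add else st.hyp }

def check_alt (l : String) : Int :=
  let st := l.toList.foldl stepB ⟨false, none, none, [], []⟩
  if st.sup.any (fun a => decide (babA a ∈ st.hyp)) then 1 else 0

-- ===== PRECONDITION & SPEC =====
def Spec_check (l : String) (out : Int) : Prop := out = check_alt l
instance (l : String) (out : Int) : Decidable (Spec_check l out) := by unfold Spec_check; infer_instance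

-- ===== CLAIM (what is proved, stated in full; the proofs are below) =====
def Claim_equal_check : Prop := ∀ (l : String), Dom_check l → Spec_check l (check l)

-- ===== LEMMAS AND PROOFS =====

-- structural form of `aba`
def abaT : List Char → List (List Char)
  | x :: y :: z :: t => (if x = z ∧ y ≠ z then [[x, y, z]] else []) ++ abaT (y :: z :: t)
  | _ => []

theorem abaT_short (s : List Char) (h : s.length ≤ 2) : abaT s = [] := by
  match s with
  | [] => rfl
  | [_] => rfl
  | [_, _] => rfl
  | _ :: _ :: _ :: _ => simp at h

theorem abaA_go (t : List Char) : ∀ (m j : Nat) (acc : List (List Char)), t.length ≤ j + m →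
    (PySem.List.pyRange ((j : Int) + 2) (t.length : Int) 1).foldl
      (fun out i =>
        if PySem.List.pyGetD t (i - 2) ' ' = PySem.List.pyGetD t i ' ' ∧
           PySem.List.pyGetD t (i - 1) ' ' ≠ PySem.List.pyGetD t i ' '
        then out ++ [PySem.List.slice t (some (i - 2)) (some (i + 1))]
        else out) acc
    = acc ++ abaT (t.drop j) := by
  intro m
  induction m with
  | zero =>
    intro j acc h
    have he : PySem.List.pyRange ((j : Int) + 2) (t.length : Int) 1 = [] := by
      simp [PySem.List.pyRange]; omega
    rw [he]
    simp [abaT_short (t.drop j) (by simp; omega)]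
  | succ m ih =>
    intro j acc h
    by_cases hlt : j + 2 < t.length
    · rw [PySem.List.pyRange_one_cons (by exact_mod_cast by omega)]
      have hd3 : 2 < (t.drop j).length := by simp; omega
      obtain ⟨a, ha⟩ : ∃ a, (t.drop j)[0]? = some a := ⟨_, List.getElem?_eq_getElem (by omega)⟩
      obtain ⟨b, hb⟩ : ∃ b, (t.drop j)[1]? = some b := ⟨_, List.getElem?_eq_getElem (by omega)⟩
      obtain ⟨cc, hc⟩ : ∃ cc, (t.drop j)[2]? = some cc := ⟨_, List.getElem?_eq_getElem (by omega)⟩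
      have hdrop : t.drop j = a :: b :: cc :: (t.drop (j + 3)) := by
        apply List.ext_getElem?
        intro k
        match k with
        | 0 => simpa using ha
        | 1 => simpa using hb
        | 2 => simpa using hc
        | (k + 3) =>
          simp only [List.getElem?_drop]
          rw [show (k + 3 : Nat) = (k + 2) + 1 from by omega, List.getElem?_cons_succ,
            show (k + 2 : Nat) = (k + 1) + 1 from by omega, List.getElem?_cons_succ,
            List.getElem?_cons_succ, List.getElem?_drop]
          congr 1; omega
      -- evaluate the head step
      have e0 : (j : Int) + 2 - 2 = ((j : Nat) : Int) := by ring
      have e1 : (j : Int) + 2 - 1 = (((j + 1 : Nat)) : Int) := by push_cast; ring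
      have e2 : ((j : Int) + 2) = (((j + 2 : Nat)) : Int) := by push_cast; ring
      have e3 : ((j : Int) + 2 + 1) = ((j : Int) + ((3 : Nat) : Int)) := by push_cast; ring
      have ha' : t[j]? = some a := by
        have h' := ha; rw [List.getElem?_drop] at h'; simpa using h'
      have hb' : t[j + 1]? = some b := by
        have h' := hb; rw [List.getElem?_drop] at h'; simpa using h'
      have hc' : t[j + 2]? = some cc := by
        have h' := hc; rw [List.getElem?_drop] at h'; simpa using h'
      have g0 : PySem.List.pyGetD t ((j : Int) + 2 - 2) ' ' = a := by
        rw [e0, PySem.List.pyGetD_natCast, List.getD_eq_getElem?_getD, ha']; rfl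
      have g1 : PySem.List.pyGetD t ((j : Int) + 2 - 1) ' ' = b := by
        rw [e1, PySem.List.pyGetD_natCast, List.getD_eq_getElem?_getD, hb']; rfl
      have g2 : PySem.List.pyGetD t ((j : Int) + 2) ' ' = cc := by
        rw [e2, PySem.List.pyGetD_natCast, List.getD_eq_getElem?_getD, hc']; rfl
      have gs : PySem.List.slice t (some ((j : Int) + 2 - 2)) (some ((j : Int) + 2 + 1))
          = [a, b, cc] := by
        rw [e0, e3, PySem.List.slice_natCast_add t j 3, hdrop]
        rfl
      simp only [List.foldl_cons, g0, g1, g2, gs]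
      have hrec : ((j : Int) + 2) + 1 = ((j + 1 : Nat) : Int) + 2 := by push_cast; ring
      rw [hrec, ih (j + 1) _ (by omega)]
      rw [show t.drop (j + 1) = b :: cc :: (t.drop (j + 3)) from by
        rw [← List.tail_drop, hdrop]; rfl]
      rw [hdrop]
      by_cases hg : a = cc ∧ b ≠ cc
      · simp [abaT, hg]
      · simp [abaT, hg]
    · have he : PySem.List.pyRange ((j : Int) + 2) (t.length : Int) 1 = [] := by
        simp [PySem.List.pyRange]; omega
      rw [he]
      simp [abaT_short (t.drop j) (by simp; omega)]

theorem abaA_eq (s : List Char) : abaA s = abaT s := by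
  unfold abaA
  rw [PySem.List.len_eq]
  have := abaA_go s s.length 0 [] (by omega)
  simpa using this

-- one step of B's window test
def hitW (c2 c1 : Option Char) (c : Char) : List (List Char) :=
  match c2, c1 with
  | some a, some b => if a = c ∧ b ≠ c then [[a, b, c]] else []
  | _, _ => []

-- ABAs of a delimiter-free segment scanned with window (c2, c1) already loaded
def abaW (c2 c1 : Option Char) : List Char → List (List Char)
  | [] => []
  | c :: cs => hitW c2 c1 c ++ abaW c1 (some c) cs

theorem abaW_some (x y : Char) : ∀ (s : List Char), abaW (some x) (some y) s = abaT (x :: y :: s) := by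
  intro s
  induction s generalizing x y with
  | nil => simp [abaW, abaT]
  | cons c cs ih => simp [abaW, abaT, hitW, ih]

theorem abaW_none (s : List Char) : abaW none none s = abaT s := by
  match s with
  | [] => rfl
  | [x] => simp [abaW, hitW, abaT]
  | x :: y :: t => simp [abaW, hitW, abaW_some]

-- what B collects from the rest of the string, starting in a given state
def collectB (ins : Bool) (c2 c1 : Option Char) :
    List Char → List (List Char) × List (List Char)
  | [] => ([], [])
  | c :: cs =>
    if c = (if ins then ']' else '[') then collectB (!ins) none none cs
    else
      let r := collectB ins c1 (some c) cs
      if ins then (r.1, hitW c2 c1 c ++ r.2) else (hitW c2 c1 c ++ r.1, r.2)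

theorem splitOnce_getD_le (c : Char) (l : List Char) :
    ((splitOnce c l).2.getD []).length ≤ l.length := by
  cases hsp : splitOnce c l with
  | mk p r =>
    cases r with
    | none => simp
    | some rest =>
      have := splitOnce_len c l p rest hsp
      simp; omega

theorem splitOnce_getD_lt (c : Char) (l : List Char) (h : l ≠ []) :
    ((splitOnce c l).2.getD []).length < l.length := by
  cases hsp : splitOnce c l with
  | mk p r =>
    cases r with
    | none => simp; exact List.length_pos_iff.mpr h
    | some rest =>
      have := splitOnce_len c l p rest hsp
      simp; omega

-- what A collects, segment by segment
def collectA (l : List Char) : List (List Char) × List (List Char) :=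
  if h : 0 < l.length then
    let s1 := splitOnce '[' l
    let l1 := s1.2.getD []
    let s2 := splitOnce ']' l1
    let l2 := s2.2.getD []
    let r := collectA l2
    (abaT s1.1 ++ r.1, abaT s2.1 ++ r.2)
  else ([], [])
termination_by l.length
decreasing_by
  exact Nat.lt_of_le_of_lt (splitOnce_getD_le ']' ((splitOnce '[' l).2.getD []))
    (splitOnce_getD_lt '[' l (by intro hnil; rw [hnil] at h; simp at h))

theorem foldB_eq (l : List Char) : ∀ (ins : Bool) (c2 c1 : Option Char)
    (sup hyp : List (List Char)),
    (l.foldl stepB ⟨ins, c2, c1, sup, hyp⟩).sup = sup ++ (collectB ins c2 c1 l).1 ∧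
    (l.foldl stepB ⟨ins, c2, c1, sup, hyp⟩).hyp = hyp ++ (collectB ins c2 c1 l).2 := by
  induction l with
  | nil => intro ins c2 c1 sup hyp; simp [collectB]
  | cons c cs ih =>
    intro ins c2 c1 sup hyp
    by_cases hd : c = (if ins then ']' else '[')
    · simp only [List.foldl_cons, stepB, if_pos hd, collectB]
      simpa [hd] using ih (!ins) none none sup hyp
    · simp only [List.foldl_cons, stepB, if_neg hd, collectB]
      cases ins with
      | false =>
        have := ih false c1 (some c) (sup ++ hitW c2 c1 c) hyp
        simp only [hitW] at this ⊢
        simp [this]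
      | true =>
        have := ih true c1 (some c) sup (hyp ++ hitW c2 c1 c)
        simp only [hitW] at this ⊢
        simp [this]

theorem collectB_seg (ins : Bool) : ∀ (l : List Char) (c2 c1 : Option Char),
    collectB ins c2 c1 l =
      (match splitOnce (if ins then ']' else '[') l with
       | (p, none) => if ins then (([] : List (List Char)), abaW c2 c1 p) else (abaW c2 c1 p, [])
       | (p, some r) =>
         let q := collectB (!ins) none none r
         if ins then (q.1, abaW c2 c1 p ++ q.2) else (abaW c2 c1 p ++ q.1, q.2)) := by
  intro l
  induction l with
  | nil => intro c2 c1; cases ins <;> simp [collectB, splitOnce, abaW]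
  | cons c cs ih =>
    intro c2 c1
    by_cases hd : c = (if ins then ']' else '[')
    · rw [collectB, if_pos hd]
      have : splitOnce (if ins then ']' else '[') (c :: cs) = ([], some cs) := by
        simp [splitOnce, hd]
      rw [this]
      cases ins <;> simp [abaW]
    · rw [collectB, if_neg hd]
      rw [ih c1 (some c)]
      have hsp : splitOnce (if ins then ']' else '[') (c :: cs)
          = (c :: (splitOnce (if ins then ']' else '[') cs).1,
             (splitOnce (if ins then ']' else '[') cs).2) := by
        simp [splitOnce, hd]
      rw [hsp]
      cases hsp2 : splitOnce (if ins then ']' else '[') cs with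
      | mk p r =>
        cases r with
        | none => cases ins <;> simp [abaW]
        | some rest => cases ins <;> simp [abaW]

theorem collectB_false_none (l p : List Char) (c2 c1 : Option Char)
    (h : splitOnce '[' l = (p, none)) :
    collectB false c2 c1 l = (abaW c2 c1 p, []) := by
  rw [collectB_seg false l c2 c1]
  simp [h]

theorem collectB_false_some (l p r : List Char) (c2 c1 : Option Char)
    (h : splitOnce '[' l = (p, some r)) :
    collectB false c2 c1 l =
      (abaW c2 c1 p ++ (collectB true none none r).1, (collectB true none none r).2) := by
  rw [collectB_seg false l c2 c1]
  simp [h]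

theorem collectB_true_none (l p : List Char) (c2 c1 : Option Char)
    (h : splitOnce ']' l = (p, none)) :
    collectB true c2 c1 l = ([], abaW c2 c1 p) := by
  rw [collectB_seg true l c2 c1]
  simp [h]

theorem collectB_true_some (l p r : List Char) (c2 c1 : Option Char)
    (h : splitOnce ']' l = (p, some r)) :
    collectB true c2 c1 l =
      ((collectB false none none r).1, abaW c2 c1 p ++ (collectB false none none r).2) := by
  rw [collectB_seg true l c2 c1]
  simp [h]

theorem collectA_nil : collectA [] = ([], []) := by
  rw [collectA]; simp

theorem collectB_eq_collectA : ∀ (m : Nat) (l : List Char), l.length ≤ m →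
    collectB false none none l = collectA l := by
  intro m
  induction m with
  | zero =>
    intro l h
    have : l = [] := by cases l <;> simp_all
    subst this
    rw [collectA_nil]
    simp [collectB]
  | succ m ih =>
    intro l h
    by_cases hne : l = []
    · subst hne; rw [collectA_nil]; simp [collectB]
    · cases hsp1 : splitOnce '[' l with
      | mk p1 r1 =>
        rw [collectA, dif_pos (List.length_pos_iff.mpr hne)]
        cases r1 with
        | none =>
          rw [collectB_false_none l p1 none none hsp1]
          simp [hsp1, abaW_none, splitOnce, collectA_nil, abaT]
        | some rest =>
          have hrest : rest.length < l.length := by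
            have := splitOnce_len '[' l p1 rest hsp1; omega
          rw [collectB_false_some l p1 rest none none hsp1]
          cases hsp2 : splitOnce ']' rest with
          | mk p2 r2 =>
            cases r2 with
            | none =>
              rw [collectB_true_none rest p2 none none hsp2]
              simp [hsp1, hsp2, abaW_none, collectA_nil]
            | some l2 =>
              have hl2 : l2.length < rest.length := by
                have := splitOnce_len ']' rest p2 l2 hsp2; omega
              rw [collectB_true_some rest p2 l2 none none hsp2, ih l2 (by omega)]
              simp [hsp1, hsp2, abaW_none]

theorem pyGetD_pair_one (p r : List Char) : PySem.List.pyGetD [p, r] 1 [] = r := by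
  simpa using PySem.List.pyGetD_natCast [p, r] 1 []

theorem checkGo_eq : ∀ (m : Nat) (l : List Char), l.length ≤ m → ∀ (abas babs : List (List Char)),
    checkGo l abas babs = finalA (abas ++ (collectA l).1) (babs ++ (collectA l).2) := by
  intro m
  induction m with
  | zero =>
    intro l h abas babs
    have : l = [] := by cases l <;> simp_all
    subst this
    rw [checkGo, collectA_nil]
    simp
  | succ m ih =>
    intro l h abas babs
    by_cases hne : l = []
    · subst hne; rw [checkGo, collectA_nil]; simp
    · have hpos : 0 < l.length := List.length_pos_iff.mpr hne
      rw [checkGo, dif_pos hpos, collectA, dif_pos hpos]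
      cases hsp1 : splitOnce '[' l with
      | mk p1 r1 =>
        rw [splitOnMax_one]
        simp only [hsp1]
        cases r1 with
        | none =>
          rw [show pickA [p1] = [] from by simp [pickA, PySem.List.len_eq]]
          rw [splitOnMax_one]
          simp [splitOnce, pickA, PySem.List.len_eq, abaA_eq, collectA_nil,
            PySem.List.pyGetD_zero_cons, ih [] (by simp)]
        | some rest =>
          have hrest : rest.length < l.length := by
            have := splitOnce_len '[' l p1 rest hsp1; omega
          rw [show pickA [p1, rest] = rest from by
            rw [pickA, PySem.List.len_eq]
            rw [if_pos (by norm_num)]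
            exact pyGetD_pair_one p1 rest]
          rw [splitOnMax_one]
          cases hsp2 : splitOnce ']' rest with
          | mk p2 r2 =>
            simp only [hsp2]
            cases r2 with
            | none =>
              rw [show pickA [p2] = [] from by simp [pickA, PySem.List.len_eq]]
              simp [abaA_eq, collectA_nil, PySem.List.pyGetD_zero_cons, hsp2,
                ih [] (by simp)]
            | some l2 =>
              have hl2 : l2.length < rest.length := by
                have := splitOnce_len ']' rest p2 l2 hsp2; omega
              rw [show pickA [p2, l2] = l2 from by
                rw [pickA, PySem.List.len_eq]
                rw [if_pos (by norm_num)]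
                exact pyGetD_pair_one p2 l2]
              rw [ih l2 (by omega)]
              simp [abaA_eq, PySem.List.pyGetD_zero_cons, hsp2]

theorem finalA_eq (babs : List (List Char)) : ∀ (abas : List (List Char)),
    finalA abas babs = if abas.any (fun a => decide (babA a ∈ babs)) then 1 else 0 := by
  intro abas
  induction abas with
  | nil => simp [finalA]
  | cons a rest ih =>
    rw [finalA]
    by_cases hm : babA a ∈ babs
    · simp [hm]
    · simp [hm, ih]

-- ===== VERDICT (by name: the statement is the Claim_ definition above) =====
theorem check_spec : Claim_equal_check := by
  intro l _
  unfold Spec_check check check_alt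
  have hf := foldB_eq l.toList false none none [] []
  have hc := collectB_eq_collectA l.toList.length l.toList (le_refl _)
  have hA := checkGo_eq l.toList.length l.toList (le_refl _) [] []
  rw [hA, finalA_eq]
  simp only [hf.1, hf.2, hc, List.nil_append]
  rfl
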